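-- pv_equiv track=rewrite | github.com/es-ude/eeg-hardware | 2_pc_datahandler/eeg_api/src_eeg_api/data_processing.py | extract_error_flags
-- ===== SOURCE A (Python) =====
-- def extract_error_flags(error_flag_byte: int) -> list:
--     """Extracts the error flags from the given byte and returns them as a list of integers (0 or 1)
--
--     Args:
--         error_flag_byte (int): The error flag byte to extract flags from
--
--     Returns:
--         list: List of error flags (0 or 1) for each channel
--     """
--     channel_flags = []
--     for bit_position in range(8):
--         if (error_flag_byte >> bit_position) & 0x01:
--             channel_flags.append(1)
--         else:
--             channel_flags.append(0)
--     return channel_flags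
-- ===== SOURCE B (Python) =====
-- def extract_error_flags(error_flag_byte: int) -> list:
--     """Extracts the error flags from the given byte and returns them as a list of integers (0 or 1)"""
--     return [int(c) for c in format(error_flag_byte & 0xFF, '08b')[::-1]]
-- ===== Notes on version B (the rewrite author's own statement) =====
-- stated objective: idiomatic
-- what changed: Replaces the per-bit shift-and-append loop with a single '08b' string formatting of the masked byte, reversed and mapped to ints.
import Mathlib
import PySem

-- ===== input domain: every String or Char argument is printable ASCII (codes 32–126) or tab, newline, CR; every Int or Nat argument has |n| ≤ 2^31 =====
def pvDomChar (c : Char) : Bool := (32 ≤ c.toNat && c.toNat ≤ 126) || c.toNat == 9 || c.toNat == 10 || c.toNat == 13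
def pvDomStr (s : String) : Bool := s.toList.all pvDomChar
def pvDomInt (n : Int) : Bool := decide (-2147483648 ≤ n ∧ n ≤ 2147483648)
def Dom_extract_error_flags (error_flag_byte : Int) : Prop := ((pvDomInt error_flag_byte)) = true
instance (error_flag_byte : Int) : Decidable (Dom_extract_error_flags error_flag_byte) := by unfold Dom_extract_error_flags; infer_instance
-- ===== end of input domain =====

-- B replaces A's per-bit shift/test loop by formatting the masked byte as an 8-char binary
-- string, reversing it and mapping characters to ints (objective: idiomatic).

-- ===== PORT A =====
-- A's loop 'for bit_position in range(8): if (b >> bit_position) & 0x01: append 1 else append 0'.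
-- Python 'x >> k' on ints is floor division by 2^k and 'x & 1' is 'x % 2' (exact for all ints,
-- including negatives); ported with PySem.Int.floordiv / PySem.Int.mod.
def extract_error_flags (error_flag_byte : Int) : List Int :=
  (PySem.List.pyRange 0 8 1).foldl
    (fun channel_flags bit_position =>
      if PySem.Int.mod (PySem.Int.floordiv error_flag_byte ((2 : Int) ^ bit_position.toNat)) 2 ≠ 0
      then channel_flags ++ [1] else channel_flags ++ [0])
    []

-- ===== PORT B =====
-- format(m, '08b') for 0 ≤ m < 256: 8 binary digits, most significant first.
def pvBin8 : Nat → Int → List Char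
  | 0, _ => []
  | k + 1, m => pvBin8 k (PySem.Int.floordiv m 2) ++ [if PySem.Int.mod m 2 = 1 then '1' else '0']

-- '[int(c) for c in format(b & 0xFF, "08b")[::-1]]'; 'b & 0xFF' is 'b % 256' (exact for all
-- ints), and int('1')/int('0') is the 1/0 map on the digit characters.
def extract_error_flags_alt (error_flag_byte : Int) : List Int :=
  ((pvBin8 8 (PySem.Int.mod error_flag_byte 256)).reverse).map
    (fun c => if c = '1' then 1 else 0)

-- ===== PRECONDITION & SPEC =====
def Spec_extract_error_flags (error_flag_byte : Int) (out : List Int) : Prop := out = extract_error_flags_alt error_flag_byte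
instance (error_flag_byte : Int) (out : List Int) : Decidable (Spec_extract_error_flags error_flag_byte out) := by unfold Spec_extract_error_flags; infer_instance

-- ===== CLAIM (what is proved, stated in full; the proofs are below) =====
def Claim_equal_extract_error_flags : Prop := ∀ (error_flag_byte : Int), Dom_extract_error_flags error_flag_byte → Spec_extract_error_flags error_flag_byte (extract_error_flags error_flag_byte)

-- ===== LEMMAS AND PROOFS =====

-- proof helper: a fold that appends one element per item is a map
theorem pv_foldl_app {a b : Type} (f : b -> a) : forall (l : List b) (init : List a),
    l.foldl (fun acc x => acc ++ [f x]) init = init ++ l.map f := by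
  intro l
  induction l with
  | nil => intro init; simp
  | cons x xs ih => intro init; simp [List.foldl, ih]

-- A depends on its argument only through its residue mod 256.
theorem pv_A_mod (n : Int) :
    extract_error_flags n = extract_error_flags (PySem.Int.mod n 256) := by
  have hstep : forall (acc : List Int) (c : Prop) [Decidable c],
      (if c then acc ++ [(1:Int)] else acc ++ [0]) = acc ++ [if c then 1 else 0] := by
    intro acc c _; split <;> rfl
  have h256 : PySem.Int.mod n 256 = n % 256 := PySem.Int.mod_eq_emod_of_pos (by norm_num)
  simp only [extract_error_flags, hstep, pv_foldl_app, h256,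
    show PySem.List.pyRange 0 8 1 = [0, 1, 2, 3, 4, 5, 6, 7] from by decide,
    List.map_cons, List.map_nil, List.nil_append, List.cons.injEq, and_true]
  norm_num [PySem.Int.mod_eq_emod_of_pos, PySem.Int.floordiv_eq_ediv_of_pos]
  simp only [show ((2:Int) ^ Int.toNat 2) = 4 from by decide,
    show ((2:Int) ^ Int.toNat 3) = 8 from by decide,
    show ((2:Int) ^ Int.toNat 4) = 16 from by decide,
    show ((2:Int) ^ Int.toNat 5) = 32 from by decide,
    show ((2:Int) ^ Int.toNat 6) = 64 from by decide,
    show ((2:Int) ^ Int.toNat 7) = 128 from by decide]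
  refine ⟨?_, ?_, ?_, ?_, ?_, ?_, ?_⟩ <;> exact if_congr (by omega) rfl rfl

-- B depends on its argument only through its residue mod 256.
theorem pv_B_mod (n : Int) :
    extract_error_flags_alt (PySem.Int.mod n 256) = extract_error_flags_alt n := by
  unfold extract_error_flags_alt
  have : PySem.Int.mod (PySem.Int.mod n 256) 256 = PySem.Int.mod n 256 := by
    rw [PySem.Int.mod_eq_emod_of_pos (by norm_num), PySem.Int.mod_eq_emod_of_pos (by norm_num)]
    omega
  rw [this]

-- A = B on each of the 256 residues.
set_option maxRecDepth 8000 in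
theorem pv_main256 : ∀ m : Fin 256,
    extract_error_flags (m : Int) = extract_error_flags_alt (m : Int) := by decide

-- ===== VERDICT (by name: the statement is the Claim_ definition above) =====
theorem extract_error_flags_spec : Claim_equal_extract_error_flags := by
  intro n _
  unfold Spec_extract_error_flags
  have hm : PySem.Int.mod n 256 = n % 256 := PySem.Int.mod_eq_emod_of_pos (by norm_num)
  have h0 : 0 ≤ n % 256 := Int.emod_nonneg n (by norm_num)
  have h1 : n % 256 < 256 := Int.emod_lt_of_pos n (by norm_num)
  have hk : (n % 256).toNat < 256 := by omega
  have hcast : ((⟨(n % 256).toNat, hk⟩ : Fin 256) : Int) = PySem.Int.mod n 256 := by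
    show (((n % 256).toNat : Nat) : Int) = PySem.Int.mod n 256
    rw [hm]; omega
  calc extract_error_flags n
      = extract_error_flags (PySem.Int.mod n 256) := pv_A_mod n
    _ = extract_error_flags_alt (PySem.Int.mod n 256) := by
        rw [← hcast]; exact pv_main256 _
    _ = extract_error_flags_alt n := pv_B_mod n
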